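-- pv_equiv track=rewrite | github.com/DawYeong/Advent-of-Code | 2024/day15/day15.py | check_pos_hit_object
-- ===== SOURCE A (Python) =====
-- from typing import List, Set, Tuple
--
-- def check_pos_hit_object(objects: List[Tuple[int, int]], position: Tuple[int, int]):
--     hit_boxes = set()
--     for obj in objects:
--         for i in range(2):
--             obj_pos = (obj[0], obj[1] + i)
--             if position == obj_pos:
--                 hit_boxes.add(obj)
--                 break
--
--     return hit_boxes
-- ===== SOURCE B (Python) =====
-- from typing import List, Set, Tuple
--
-- def check_pos_hit_object(objects: List[Tuple[int, int]], position: Tuple[int, int]):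
--     # Build an inverted coverage index: covered cell -> set of anchors covering it
--     # (an anchor (x, y) covers cells (x, y) and (x, y + 1)); then answer the query
--     # by a single dictionary lookup instead of testing each object against the position.
--     cover = {}
--     for x, y in objects:
--         cover.setdefault((x, y), set()).add((x, y))
--         cover.setdefault((x, y + 1), set()).add((x, y))
--     return cover.get(position, set())
-- ===== Notes on version B (the rewrite author's own statement) =====
-- stated objective: alternative
-- what changed: A scans the objects testing each against the queried position (generating the two cells an object covers, with an inner loop and break); B instead builds an inverted coverage index, a dict mapping each covered cell to the set of anchors covering it, and answers the query by a single dict lookup cover.get(position, set()).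
import Mathlib
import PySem

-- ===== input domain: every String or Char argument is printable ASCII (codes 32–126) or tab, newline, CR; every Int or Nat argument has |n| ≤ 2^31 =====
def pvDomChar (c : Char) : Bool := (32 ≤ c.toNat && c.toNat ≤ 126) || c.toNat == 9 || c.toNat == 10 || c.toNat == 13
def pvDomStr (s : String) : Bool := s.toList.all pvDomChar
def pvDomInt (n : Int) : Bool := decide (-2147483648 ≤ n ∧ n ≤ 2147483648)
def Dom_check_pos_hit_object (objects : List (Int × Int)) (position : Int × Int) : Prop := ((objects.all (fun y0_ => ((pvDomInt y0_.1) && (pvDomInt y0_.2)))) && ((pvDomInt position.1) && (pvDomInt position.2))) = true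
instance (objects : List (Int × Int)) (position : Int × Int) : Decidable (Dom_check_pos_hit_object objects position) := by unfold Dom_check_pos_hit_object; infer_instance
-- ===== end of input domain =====

-- B replaces A's per-object hit test by an inverted coverage index (dict: covered
-- cell -> set of covering anchors) answered with a single lookup (objective: alternative).


-- ===== PORT A =====
-- A's inner 'for i in range(2): … break' loop, transliterated with the break as early return
def checkPosInnerA (position obj : Int × Int) (hit_boxes : PySem.Set (Int × Int)) : List Int → PySem.Set (Int × Int)
  | [] => hit_boxes
  | i :: rest =>
      if position = (obj.1, obj.2 + i) then PySem.Set.add hit_boxes obj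
      else checkPosInnerA position obj hit_boxes rest

def check_pos_hit_object (objects : List (Int × Int)) (position : Int × Int) : List (Int × Int) :=
  objects.foldl (fun hit_boxes obj => checkPosInnerA position obj hit_boxes (PySem.List.pyRange 0 2 1))
    PySem.Set.empty

-- ===== PORT B =====
-- one loop iteration of B: cover.setdefault((x,y), set()).add((x,y)); cover.setdefault((x,y+1), set()).add((x,y))
def coverStepB (cover : PySem.Dict (Int × Int) (PySem.Set (Int × Int))) (obj : Int × Int) :
    PySem.Dict (Int × Int) (PySem.Set (Int × Int)) :=
  ((cover.modify (obj.1, obj.2) PySem.Set.empty (fun s => PySem.Set.add s (obj.1, obj.2))).modify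
    (obj.1, obj.2 + 1) PySem.Set.empty (fun s => PySem.Set.add s (obj.1, obj.2)))

def check_pos_hit_object_alt (objects : List (Int × Int)) (position : Int × Int) : List (Int × Int) :=
  (objects.foldl coverStepB PySem.Dict.empty).getD position PySem.Set.empty

-- ===== PRECONDITION & SPEC =====
def Spec_check_pos_hit_object (objects : List (Int × Int)) (position : Int × Int) (out : List (Int × Int)) : Prop := out = check_pos_hit_object_alt objects position
instance (objects : List (Int × Int)) (position : Int × Int) (out : List (Int × Int)) : Decidable (Spec_check_pos_hit_object objects position out) := by unfold Spec_check_pos_hit_object; infer_instance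

-- ===== CLAIM =====
def Claim_equal_check_pos_hit_object : Prop := ∀ (objects : List (Int × Int)) (position : Int × Int), Dom_check_pos_hit_object objects position → Spec_check_pos_hit_object objects position (check_pos_hit_object objects position)

-- ===== LEMMAS AND PROOFS =====

-- one B step, read at `position`, is exactly one A step
lemma coverStepB_getD (cover : PySem.Dict (Int × Int) (PySem.Set (Int × Int)))
    (obj : Int × Int) (position : Int × Int) :
    (coverStepB cover obj).getD position PySem.Set.empty
      = checkPosInnerA position obj (cover.getD position PySem.Set.empty)
          (PySem.List.pyRange 0 2 1) := by
  have hr : PySem.List.pyRange 0 2 1 = [0, 1] := by decide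
  rw [hr]
  obtain ⟨ox, oy⟩ := obj
  simp only [coverStepB, checkPosInnerA, PySem.Dict.getD_modify]
  have hne : ((ox, oy) : Int × Int) ≠ (ox, oy + 1) := by
    intro h; rw [Prod.mk.injEq] at h; omega
  by_cases h1 : position = (ox, oy)
  · subst h1; simp [hne]
  · by_cases h2 : position = (ox, oy + 1) <;> simp [h1, h2]

-- the whole fold: reading B's index at `position` runs A's accumulator
lemma fold_getD_eq (position : Int × Int) :
    ∀ (objects : List (Int × Int)) (cover : PySem.Dict (Int × Int) (PySem.Set (Int × Int))),
      (objects.foldl coverStepB cover).getD position PySem.Set.empty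
        = objects.foldl
            (fun hit_boxes obj => checkPosInnerA position obj hit_boxes (PySem.List.pyRange 0 2 1))
            (cover.getD position PySem.Set.empty) := by
  intro objects
  induction objects with
  | nil => intro cover; rfl
  | cons o os ih =>
      intro cover
      simp only [List.foldl_cons]
      rw [ih, coverStepB_getD]

-- ===== VERDICT =====
theorem check_pos_hit_object_spec : Claim_equal_check_pos_hit_object := by
  intro objects position _
  unfold Spec_check_pos_hit_object check_pos_hit_object check_pos_hit_object_alt
  rw [fold_getD_eq]
  rfl
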